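-- pv_equiv track=rewrite | github.com/mafuba8/adventofcode | 2025/day10/day10-1.py | change_indicator_lights
-- ===== SOURCE A (Python) =====
-- def change_indicator_lights(lights: str, button: tuple):
--     new_lights = []
--     for idx, s in enumerate(lights):
--         if idx in button:
--             if s == '#':
--                 new_lights.append('.')
--             else:
--                 new_lights.append('#')
--         else:
--             new_lights.append(s)
--     return ''.join(new_lights)
-- ===== SOURCE B (Python) =====
-- def change_indicator_lights(lights: str, button: tuple):
--     out = list(lights)
--     for idx in set(button):
--         if 0 <= idx < len(out):
--             out[idx] = '.' if out[idx] == '#' else '#'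
--     return ''.join(out)
-- ===== Notes on version B (the rewrite author's own statement) =====
-- stated objective: faster
-- what changed: Instead of scanning every character and testing membership of its index in the button tuple, B converts the string to a char list once and walks only the deduplicated button indices, toggling in place; in-range check and dedup give the same semantics as A's membership test.
import Mathlib
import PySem

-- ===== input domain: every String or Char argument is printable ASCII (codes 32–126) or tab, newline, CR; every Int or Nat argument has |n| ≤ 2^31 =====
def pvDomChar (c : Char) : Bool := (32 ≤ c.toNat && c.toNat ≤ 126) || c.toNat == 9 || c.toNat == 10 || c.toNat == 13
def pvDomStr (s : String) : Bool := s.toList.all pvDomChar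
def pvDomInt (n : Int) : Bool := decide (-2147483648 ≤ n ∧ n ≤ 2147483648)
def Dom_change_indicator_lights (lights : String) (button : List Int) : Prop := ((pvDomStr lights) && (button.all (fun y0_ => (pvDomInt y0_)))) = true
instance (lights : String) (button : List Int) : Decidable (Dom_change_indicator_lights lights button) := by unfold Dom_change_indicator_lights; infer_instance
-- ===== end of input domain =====

-- B walks only the (deduplicated) button indices and toggles in place instead of
-- scanning every character with a membership test: faster when button is sparse.


-- ===== PORT A =====
def change_indicator_lights (lights : String) (button : List Int) : String :=
  let new_lights :=
    (PySem.List.enumerate lights.toList).foldl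
      (fun acc p =>
        if p.1 ∈ button then
          (if p.2 == '#' then acc ++ ['.'] else acc ++ ['#'])
        else acc ++ [p.2]) []
  String.ofList new_lights

-- ===== PORT B =====
-- one loop body of B: toggle position idx if it is in range, else leave the list alone
def pvToggleStep (out : List Char) (idx : Int) : List Char :=
  if 0 ≤ idx ∧ idx < (out.length : Int) then
    out.set idx.toNat (if out.getD idx.toNat ' ' == '#' then '.' else '#')
  else out

def change_indicator_lights_alt (lights : String) (button : List Int) : String :=
  String.ofList ((PySem.Set.ofList button).foldl pvToggleStep lights.toList)

-- ===== PRECONDITION & SPEC =====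
def Spec_change_indicator_lights (lights : String) (button : List Int) (out : String) : Prop := out = change_indicator_lights_alt lights button
instance (lights : String) (button : List Int) (out : String) : Decidable (Spec_change_indicator_lights lights button out) := by unfold Spec_change_indicator_lights; infer_instance

-- ===== CLAIM (what is proved, stated in full; the proofs are below) =====
def Claim_equal_change_indicator_lights : Prop := ∀ (lights : String) (button : List Int), Dom_change_indicator_lights lights button → Spec_change_indicator_lights lights button (change_indicator_lights lights button)

-- ===== LEMMAS AND PROOFS =====

def pvTog (c : Char) : Char := if c == '#' then '.' else '#'

-- A's append-fold is a map
theorem pvFoldAppend (l : List (Int × Char)) (button : List Int) (acc : List Char) :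
    l.foldl (fun acc p =>
        if p.1 ∈ button then
          (if p.2 == '#' then acc ++ ['.'] else acc ++ ['#'])
        else acc ++ [p.2]) acc
      = acc ++ l.map (fun p => if p.1 ∈ button then pvTog p.2 else p.2) := by
  induction l generalizing acc with
  | nil => simp
  | cons a t ih =>
      simp only [List.foldl_cons, List.map_cons, ih, pvTog]
      by_cases h : a.1 ∈ button <;> by_cases h2 : a.2 == '#' <;> simp [h, h2]

-- B's fold toggles exactly the in-range members of a duplicate-free index list
theorem pvFoldToggleGet (idxs : List Int) (out : List Char) (hnd : idxs.Nodup) (j : Nat) :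
    (idxs.foldl pvToggleStep out)[j]? =
      if (j : Int) ∈ idxs then out[j]?.map pvTog else out[j]? := by
  induction idxs generalizing out with
  | nil => simp
  | cons a t ih =>
      have hnd' : t.Nodup := hnd.of_cons
      have hna : a ∉ t := by
        intro h; exact (List.nodup_cons.mp hnd).1 h
      have hstep : (pvToggleStep out a)[j]? =
          if (j : Int) = a then out[j]?.map pvTog else out[j]? := by
        unfold pvToggleStep
        by_cases hja : (j : Int) = a
        · subst hja
          by_cases hr : (0:Int) ≤ (j:Int) ∧ (j:Int) < (out.length : Int)
          · have hj : j < out.length := by exact_mod_cast hr.2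
            rw [if_pos hr]
            simp [Int.toNat_natCast, hj, List.getD_eq_getElem?_getD, pvTog]
          · have hj : ¬ j < out.length := by
              intro hlt; exact hr ⟨Int.natCast_nonneg j, by exact_mod_cast hlt⟩
            rw [if_neg hr]
            simp [List.getElem?_eq_none (Nat.le_of_not_lt hj)]
        · rw [if_neg hja]
          by_cases hr : (0:Int) ≤ a ∧ a < (out.length : Int)
          · rw [if_pos hr]
            have hne : a.toNat ≠ j := by
              intro h
              apply hja
              rw [← h, Int.toNat_of_nonneg hr.1]
            simp [List.getElem?_set_ne hne]
          · rw [if_neg hr]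
      simp only [List.foldl_cons]
      rw [ih (pvToggleStep out a) hnd', hstep]
      by_cases hja : (j : Int) = a
      · have hjt : (j : Int) ∉ t := by rw [hja]; exact hna
        simp [hja, hna]
      · by_cases hjt : (j : Int) ∈ t <;> simp [hja, hjt, List.mem_cons]

theorem pvMainList (xs : List Char) (button : List Int) :
    (PySem.Set.ofList button).foldl pvToggleStep xs
      = (PySem.List.enumerate xs).map (fun p => if p.1 ∈ button then pvTog p.2 else p.2) := by
  apply List.ext_getElem?
  intro j
  rw [pvFoldToggleGet _ _ (PySem.Set.nodup_ofList button) j]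
  rw [List.getElem?_map, PySem.List.getElem?_enumerate]
  have hmem : ((j : Int) ∈ PySem.Set.ofList button) ↔ ((j : Int) ∈ button) :=
    PySem.Set.mem_ofList button _
  by_cases hm : (j : Int) ∈ button
  · rw [if_pos (hmem.mpr hm)]
    cases h : xs[j]? with
    | none => simp
    | some c => simp [hm]
  · rw [if_neg (fun h => hm (hmem.mp h))]
    cases h : xs[j]? with
    | none => simp
    | some c => simp [hm]

-- ===== VERDICT (by name: the statement is the Claim_ definition above) =====
theorem change_indicator_lights_spec : Claim_equal_change_indicator_lights := by
  intro lights button _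
  unfold Spec_change_indicator_lights change_indicator_lights change_indicator_lights_alt
  simp only [pvFoldAppend _ button ([] : List Char), List.nil_append, pvMainList]
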